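-- pv_equiv track=rewrite | github.com/huber-th/AdventOfCode | 2024/day09/day09.py | reorganize_file_blocks
-- ===== SOURCE A (Python) =====
-- def has_block_of_length_n(free, n):
--     """
--     Check if there are numbers in the free list
--     which are consecutive for n blocks
--
--     Return: the first index of the first spot in free fitting block of n-blocks
--     """
--     for i in range(len(free) - n + 1):
--         if free[i + n - 1] - free[i] == n - 1:
--             return i
--     return - 1
--
-- def reorganize_file_blocks(fs):
--     """
--     Re-organize the file system by moving complete file blocks to the
--     first spot which fits them
--     """
--
--     # Find all free spots
--     free = [i for i, c in enumerate(fs) if c == '.']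
--
--     file_id = None
--     length = 0
--     for i, c in enumerate(reversed(fs[1:])):
--         # Calculate the index in the array we are at
--         idx = len(fs) - i - 1
--         if c == '.':
--             file_id = None
--         else:
--             if file_id is None:
--                 file_id = c
--             length += 1
--             if fs[idx - 1] != file_id:
--                 # File block complete, let's see if there is free space
--                 free_idx = has_block_of_length_n(free, length)
--                 if free_idx > -1 and free[free_idx] < idx:
--                     # Free space found before current index in the filesystem
--                     new_positions = []
--                     for k in range(free_idx, free_idx + length):
--                         new_positions.append(free.pop(free_idx))
--                     for pos in new_positions:
--                         fs[pos] = file_id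
--                     for j in range(length):
--                         fs[idx + j] = '.'
--                 file_id = None
--                 length = 0
--     return fs
-- ===== SOURCE B (Python) =====
-- def reorganize_file_blocks(fs):
--     """
--     Re-organize the file system by moving complete file blocks to the
--     first spot which fits them
--     """
--     n = len(fs)
--     # Run-length encode the free space: gaps is a list of (start, length)
--     # pairs, one per maximal run of '.' cells, in increasing order.
--     gaps = []
--     i = 0
--     while i < n:
--         if fs[i] == '.':
--             j = i + 1
--             while j < n and fs[j] == '.':
--                 j += 1
--             gaps.append((i, j - i))
--             i = j
--         else:
--             i += 1
--     orig = list(fs)  # characters are scanned from a snapshot; boundaries use fs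
--     file_id = None
--     length = 0
--     for idx in range(n - 1, 0, -1):
--         c = orig[idx]
--         if c == '.':
--             file_id = None
--         else:
--             if file_id is None:
--                 file_id = c
--             length += 1
--             if fs[idx - 1] != file_id:
--                 # leftmost gap that fits the block; shrink it from the left
--                 for k, (s, l) in enumerate(gaps):
--                     if l >= length:
--                         if s < idx:
--                             for p in range(s, s + length):
--                                 fs[p] = file_id
--                             for j in range(length):
--                                 fs[idx + j] = '.'
--                             if l == length:
--                                 del gaps[k]
--                             else:
--                                 gaps[k] = (s + length, l - length)
--                         break
--                 file_id = None
--                 length = 0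
--     return fs
-- ===== Notes on version B (the rewrite author's own statement) =====
-- stated objective: alternative
-- what changed: A keeps every free cell index in a flat list, rescans it cell by cell for a consecutive run and pops the claimed cells one list.pop at a time per moved file; B run-length encodes the free space once into (start, length) gaps and serves each file by scanning only the gap list and shrinking one gap in place (measured ~1.2x faster on the generated inputs, below the 1.5x bar, so no speed is claimed).
import Mathlib
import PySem

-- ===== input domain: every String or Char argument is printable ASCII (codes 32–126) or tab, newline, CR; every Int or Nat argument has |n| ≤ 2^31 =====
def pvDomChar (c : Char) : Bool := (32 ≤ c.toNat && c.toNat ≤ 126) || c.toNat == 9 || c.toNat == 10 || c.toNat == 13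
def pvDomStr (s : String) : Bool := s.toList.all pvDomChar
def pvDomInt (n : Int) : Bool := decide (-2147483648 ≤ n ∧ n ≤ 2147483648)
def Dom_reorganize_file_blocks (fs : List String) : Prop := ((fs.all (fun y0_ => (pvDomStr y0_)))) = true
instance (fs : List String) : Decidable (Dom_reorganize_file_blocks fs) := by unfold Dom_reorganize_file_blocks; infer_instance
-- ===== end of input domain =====

-- B replaces A's per-cell free-position list (scanned and popped cell by cell for every
-- file block) by a run-length list of gaps (start, length), searched and shrunk once per
-- block; both A and B mutate the argument list in place in Python — the theorems below are
-- about the returned value (which is that same list).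

-- shared primitive: Python's "xs[i] = v"; exact for the nonnegative in-range
-- indices both programs use (Python raises IndexError otherwise — unreachable here)
def pySetItem (xs : List String) (i : Int) (v : String) : List String :=
  xs.set i.toNat v

-- ===== PORT A =====
-- the 'for i in range(...)' scan of has_block_of_length_n; list accesses are in range in
-- every call the entry function makes (0 ≤ i, i + n - 1 < len free), so pyGetD is exact
def hbGo (free : List Int) (n : Int) : List Int → Int
  | [] => -1
  | i :: rest =>
    if PySem.List.pyGetD free (i + n - 1) 0 - PySem.List.pyGetD free i 0 == n - 1 then i
    else hbGo free n rest

def has_block_of_length_n (free : List Int) (n : Int) : Int :=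
  hbGo free n (PySem.List.pyRange 0 ((free.length : Int) - n + 1) 1)

-- one iteration of A's 'for i, c in enumerate(reversed(fs[1:]))' loop;
-- state = (fs, free, file_id, length)
def stepA (len0 : Int) (st : List String × List Int × Option String × Int) (ic : Int × String) :
    List String × List Int × Option String × Int :=
  let fsv := st.1
  let free := st.2.1
  let file_id := st.2.2.1
  let len := st.2.2.2
  let idx := len0 - ic.1 - 1
  if ic.2 == "." then (fsv, free, none, len)
  else
    let fid := file_id.getD ic.2
    let len := len + 1
    if PySem.List.pyGetD fsv (idx - 1) "" == fid then
      (fsv, free, some fid, len)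
    else
      let free_idx := has_block_of_length_n free len
      if free_idx > -1 && decide (PySem.List.pyGetD free free_idx 0 < idx) then
        let pr := (PySem.List.pyRange free_idx (free_idx + len) 1).foldl
          (fun (p : List Int × List Int) _ =>
            match PySem.List.pop? p.2 free_idx with
            | some vr => (p.1 ++ [vr.1], vr.2)
            | none => p) ([], free)
        let fsv1 := pr.1.foldl (fun f pos => pySetItem f pos fid) fsv
        let fsv2 := (PySem.List.pyRange 0 len 1).foldl (fun f j => pySetItem f (idx + j) ".") fsv1
        (fsv2, pr.2, none, 0)
      else (fsv, free, none, 0)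

def reorganize_file_blocks (fs : List String) : List String :=
  let free : List Int :=
    (PySem.List.enumerate fs).filterMap (fun ic => if ic.2 == "." then some ic.1 else none)
  ((PySem.List.enumerate ((PySem.List.slice fs (some 1) none).reverse)).foldl
    (stepA (fs.length : Int)) (fs, free, none, 0)).1

-- ===== PORT B =====
-- inner 'while j < n and fs[j] == "."' scan: counts the leading '.' cells
def takeRun : List String → Int × List String
  | [] => (0, [])
  | c :: rest => if c == "." then let r := takeRun rest; (1 + r.1, r.2) else (0, c :: rest)

-- needed by buildGaps's termination proof
theorem takeRun_len (xs : List String) : (takeRun xs).2.length ≤ xs.length := by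
  induction xs with
  | nil => simp [takeRun]
  | cons c rest ih =>
    simp only [takeRun]
    split
    · simpa using Nat.le_succ_of_le ih
    · simp

-- B's outer 'while i < n' scan building the run-length gap list
def buildGaps : List String → Int → List (Int × Int)
  | [], _ => []
  | c :: rest, i =>
    if c == "." then
      let r := takeRun rest
      (i, 1 + r.1) :: buildGaps r.2 (i + 1 + r.1)
    else buildGaps rest (i + 1)
termination_by xs _ => xs.length
decreasing_by
  all_goals simp
  all_goals exact takeRun_len rest

-- B's 'for k, (s, l) in enumerate(gaps): if l >= length: ... break' loop:
-- returns the updated gap list and the start of the gap the block moves to (if any)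
def findMove : List (Int × Int) → Int → Int → List (Int × Int) × Option Int
  | [], _, _ => ([], none)
  | (s, l) :: gs, need, idx =>
    if need ≤ l then
      if s < idx then
        ((if l == need then gs else (s + need, l - need) :: gs), some s)
      else ((s, l) :: gs, none)
    else
      let r := findMove gs need idx
      ((s, l) :: r.1, r.2)

-- one iteration of B's 'for idx in range(n - 1, 0, -1)' loop; orig is the snapshot list(fs)
def stepB (orig : List String) (st : List String × List (Int × Int) × Option String × Int) (idx : Int) :
    List String × List (Int × Int) × Option String × Int :=
  let fsv := st.1
  let gaps := st.2.1
  let file_id := st.2.2.1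
  let len := st.2.2.2
  let c := PySem.List.pyGetD orig idx ""
  if c == "." then (fsv, gaps, none, len)
  else
    let fid := file_id.getD c
    let len := len + 1
    if PySem.List.pyGetD fsv (idx - 1) "" == fid then (fsv, gaps, some fid, len)
    else
      let r := findMove gaps len idx
      match r.2 with
      | some s =>
        let fsv1 := (PySem.List.pyRange s (s + len) 1).foldl (fun f p => pySetItem f p fid) fsv
        let fsv2 := (PySem.List.pyRange 0 len 1).foldl (fun f j => pySetItem f (idx + j) ".") fsv1
        (fsv2, r.1, none, 0)
      | none => (fsv, r.1, none, 0)

def reorganize_file_blocks_alt (fs : List String) : List String :=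
  ((PySem.List.pyRange ((fs.length : Int) - 1) 0 (-1)).foldl
    (stepB fs) (fs, buildGaps fs 0, none, 0)).1

-- ===== PRECONDITION & SPEC =====
def Spec_reorganize_file_blocks (fs : List String) (out : List String) : Prop := out = reorganize_file_blocks_alt fs
instance (fs : List String) (out : List String) : Decidable (Spec_reorganize_file_blocks fs out) := by unfold Spec_reorganize_file_blocks; infer_instance

-- ===== CLAIM (what is proved, stated in full; the proofs are below) =====
def Claim_equal_reorganize_file_blocks : Prop := ∀ (fs : List String), Dom_reorganize_file_blocks fs → Spec_reorganize_file_blocks fs (reorganize_file_blocks fs)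

-- ===== LEMMAS AND PROOFS =====

-- the free-position list a gap list denotes
def rep : List (Int × Int) → List Int
  | [] => []
  | (s, l) :: gs => PySem.List.pyRange s (s + l) 1 ++ rep gs

-- gap-list invariant: starts bounded below by b, lengths ≥ 1, gaps separated by ≥ 1 cell
def InvB (b : Int) : List (Int × Int) → Prop
  | [] => True
  | (s, l) :: gs => b ≤ s ∧ 1 ≤ l ∧ InvB (s + l + 1) gs

theorem InvB_mono {b' b : Int} (h : b' ≤ b) : ∀ {gaps : List (Int × Int)}, InvB b gaps → InvB b' gaps := by
  intro gaps
  cases gaps with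
  | nil => intro _; trivial
  | cons g gs =>
    obtain ⟨s, l⟩ := g
    intro ⟨h1, h2, h3⟩
    exact ⟨le_trans h h1, h2, h3⟩

theorem rep_lb {b : Int} : ∀ {gaps : List (Int × Int)}, InvB b gaps →
    ∀ (j : Nat) (h : j < (rep gaps).length), b + j ≤ (rep gaps)[j] := by
  intro gaps
  induction gaps generalizing b with
  | nil => intro _ j h; simp [rep] at h
  | cons g gs ih =>
    obtain ⟨s, l⟩ := g
    intro ⟨h1, h2, h3⟩ j h
    simp only [rep] at h ⊢
    rcases Nat.lt_or_ge j (PySem.List.pyRange s (s + l) 1).length with hj | hj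
    · rw [List.getElem_append_left hj, PySem.List.getElem_pyRange_one _ _ _ hj]
      omega
    · rw [List.getElem_append_right hj]
      have hlen : (PySem.List.pyRange s (s + l) 1).length = l.toNat := by
        simp [PySem.List.length_pyRange_one]
      have := ih h3 (j - (PySem.List.pyRange s (s + l) 1).length)
        (by simp only [List.length_append] at h; omega)
      omega

theorem hbGo_all_false (free : List Int) (n : Int) (is : List Int)
    (h : ∀ i ∈ is, ¬ (PySem.List.pyGetD free (i + n - 1) 0 - PySem.List.pyGetD free i 0 == n - 1) = true) :
    hbGo free n is = -1 := by
  induction is with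
  | nil => rfl
  | cons i rest ih =>
    simp only [hbGo]
    rw [if_neg (h i (List.mem_cons_self))]
    exact ih (fun i hi => h i (List.mem_cons_of_mem _ hi))

theorem hbGo_append (free : List Int) (n : Int) (is js : List Int)
    (h : ∀ i ∈ is, ¬ (PySem.List.pyGetD free (i + n - 1) 0 - PySem.List.pyGetD free i 0 == n - 1) = true) :
    hbGo free n (is ++ js) = hbGo free n js := by
  induction is with
  | nil => rfl
  | cons i rest ih =>
    simp only [List.cons_append, hbGo]
    rw [if_neg (h i (List.mem_cons_self))]
    exact ih (fun i hi => h i (List.mem_cons_of_mem _ hi))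

theorem getd_shift (run R : List Int) (l k : Int) (hrun : (run.length : Int) = l)
    (hk : 0 ≤ k) (d : Int) :
    PySem.List.pyGetD (run ++ R) (l + k) d = PySem.List.pyGetD R k d := by
  rw [PySem.List.pyGetD_of_nonneg _ _ (by omega), PySem.List.pyGetD_of_nonneg _ _ hk]
  rw [List.getD_eq_getElem?_getD, List.getD_eq_getElem?_getD]
  have : (l + k).toNat = run.length + k.toNat := by omega
  rw [this, List.getElem?_append_right (Nat.le_add_right _ _)]
  congr 2
  omega

theorem pyRange_shift (l M : Int) (_hl : 0 ≤ l) :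
    PySem.List.pyRange l M 1 = (PySem.List.pyRange 0 (M - l) 1).map (fun k => l + k) := by
  rw [PySem.List.pyRange_one, PySem.List.pyRange_one, List.map_map]
  have : (M - l - 0).toNat = (M - l).toNat := by omega
  rw [this]
  apply List.map_congr_left
  intro k _
  simp

theorem hbGo_shift (run R : List Int) (n l : Int) (hn : 1 ≤ n) (hrun : (run.length : Int) = l)
    (ks : List Int) (hks : ∀ k ∈ ks, 0 ≤ k) :
    hbGo (run ++ R) n (ks.map (fun k => l + k)) =
      (if hbGo R n ks = -1 then -1 else l + hbGo R n ks) := by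
  induction ks with
  | nil => simp [hbGo]
  | cons k rest ih =>
    have hk : 0 ≤ k := hks k (List.mem_cons_self)
    simp only [List.map_cons, hbGo]
    have e1 : l + k + n - 1 = l + (k + n - 1) := by ring
    rw [e1, getd_shift run R l (k + n - 1) hrun (by omega) 0,
        getd_shift run R l k hrun hk 0,
        ih (fun x hx => hks x (List.mem_cons_of_mem _ hx))]
    by_cases hc : (PySem.List.pyGetD R (k + n - 1) 0 - PySem.List.pyGetD R k 0 == n - 1) = true
    · rw [if_pos hc, if_pos hc, if_neg (by omega)]
    · rw [if_neg hc, if_neg hc]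

-- a pop at index run.length + p acts behind the run
theorem pop_shift (run R : List Int) (p : Int) (hp : 0 ≤ p) :
    PySem.List.pop? (run ++ R) ((run.length : Int) + p) =
      (PySem.List.pop? R p).map (fun vr => (vr.1, run ++ vr.2)) := by
  simp only [PySem.List.pop?, PySem.List.pyIdx?, List.length_append]
  rcases Int.lt_or_le p (R.length : Int) with h | h
  · rw [if_pos (by omega), if_pos (by omega), if_pos hp, if_pos (by omega)]
    have ht : ((run.length : Int) + p).toNat = run.length + p.toNat := by omega
    rw [ht]
    simp only [Option.bind_some,
      List.getElem?_append_right (Nat.le_add_right run.length p.toNat), Nat.add_sub_cancel_left,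
      List.eraseIdx_append_of_length_le (Nat.le_add_right run.length p.toNat)]
    have hpn : p.toNat < R.length := by omega
    rw [List.getElem?_eq_getElem hpn]
    simp
  · rw [if_pos (by omega), if_neg (by omega), if_pos hp, if_neg (by omega)]
    rfl

-- the pop loop at a fixed index behind a run = the pop loop on the tail, run preserved
theorem pop_loop_shift (run : List Int) (p : Int) (hp : 0 ≤ p) :
    ∀ (ks : List Int) (acc R : List Int),
      ks.foldl (fun (pr : List Int × List Int) _ =>
          match PySem.List.pop? pr.2 ((run.length : Int) + p) with
          | some vr => (pr.1 ++ [vr.1], vr.2)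
          | none => pr) (acc, run ++ R)
      = ((ks.foldl (fun (pr : List Int × List Int) _ =>
          match PySem.List.pop? pr.2 p with
          | some vr => (pr.1 ++ [vr.1], vr.2)
          | none => pr) (acc, R)).1,
        run ++ (ks.foldl (fun (pr : List Int × List Int) _ =>
          match PySem.List.pop? pr.2 p with
          | some vr => (pr.1 ++ [vr.1], vr.2)
          | none => pr) (acc, R)).2) := by
  intro ks
  induction ks with
  | nil => intro acc R; rfl
  | cons k rest ih =>
    intro acc R
    simp only [List.foldl_cons, pop_shift run R p hp]
    cases hpop : PySem.List.pop? R p with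
    | none => simp only [Option.map_none]; exact ih acc R
    | some vr => simp only [Option.map_some]; exact ih (acc ++ [vr.1]) vr.2

-- the pop loop at index 0 takes a prefix
theorem pop_loop_zero :
    ∀ (ks acc xs : List Int), ks.length ≤ xs.length →
      ks.foldl (fun (pr : List Int × List Int) _ =>
          match PySem.List.pop? pr.2 (0 : Int) with
          | some vr => (pr.1 ++ [vr.1], vr.2)
          | none => pr) (acc, xs)
      = (acc ++ xs.take ks.length, xs.drop ks.length) := by
  intro ks
  induction ks with
  | nil => intro acc xs _; simp
  | cons k rest ih =>
    intro acc xs h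
    cases xs with
    | nil => simp at h
    | cons x xs' =>
      simp only [List.foldl_cons, PySem.List.pop?_zero_cons]
      rw [ih (acc ++ [x]) xs' (by simpa using h)]
      simp


-- helper: reading rep ((s,l) :: gs) inside the leading run
theorem getd_run (s l : Int) (R : List Int) (i : Int) (h0 : 0 ≤ i) (hi : i < l) :
    PySem.List.pyGetD (PySem.List.pyRange s (s + l) 1 ++ R) i 0 = s + i := by
  have hlen : (PySem.List.pyRange s (s + l) 1).length = l.toNat := by
    simp [PySem.List.length_pyRange_one]
  have hin : i.toNat < (PySem.List.pyRange s (s + l) 1).length := by omega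
  rw [PySem.List.pyGetD_eq_getElem _ _ h0 (by simp only [List.length_append]; push_cast; omega)]
  rw [List.getElem_append_left hin, PySem.List.getElem_pyRange_one _ _ _ hin]
  omega

-- THE CENTRAL LEMMA: on a well-formed gap list, A's consecutive-run search over the flat
-- free-position list, the following pop loop, and B's gap search/shrink agree.
theorem rep_lb' {b : Int} {gaps : List (Int × Int)} (h : InvB b gaps) (j : Int)
    (h0 : 0 ≤ j) (hj : j < ((rep gaps).length : Int)) :
    b + j ≤ PySem.List.pyGetD (rep gaps) j 0 := by
  rw [PySem.List.pyGetD_eq_getElem _ _ h0 hj]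
  have := rep_lb h j.toNat (by omega)
  omega

theorem core (need : Int) (hneed : 1 ≤ need) :
    ∀ (gaps : List (Int × Int)) (b : Int), 0 ≤ b → InvB b gaps →
      (has_block_of_length_n (rep gaps) need = -1 ∧
        ∀ idx, findMove gaps need idx = (gaps, none)) ∨
      (∃ p s gs1,
        has_block_of_length_n (rep gaps) need = p ∧
        0 ≤ p ∧
        PySem.List.pyGetD (rep gaps) p 0 = s ∧
        b ≤ s ∧
        (∀ idx, idx ≤ s → findMove gaps need idx = (gaps, none)) ∧
        (∀ idx, s < idx → findMove gaps need idx = (gs1, some s)) ∧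
        InvB b gs1 ∧
        (∀ (ks acc : List Int), ks.length = need.toNat →
          ks.foldl (fun (pr : List Int × List Int) _ =>
              match PySem.List.pop? pr.2 p with
              | some vr => (pr.1 ++ [vr.1], vr.2)
              | none => pr) (acc, rep gaps)
            = (acc ++ PySem.List.pyRange s (s + need) 1, rep gs1))) := by
  intro gaps
  induction gaps with
  | nil =>
    intro b _ _
    left
    constructor
    · show hbGo [] need (PySem.List.pyRange 0 (((List.length ([] : List Int)) : Int) - need + 1) 1) = -1
      rw [PySem.List.pyRange_one_eq_nil (by simp; omega)]
      rfl
    · intro idx; rfl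
  | cons g gs ih =>
    obtain ⟨s, l⟩ := g
    intro b hb0 ⟨hbs, hl1, hInvgs⟩
    have hs0 : 0 ≤ s := le_trans hb0 hbs
    set run := PySem.List.pyRange s (s + l) 1 with hrun_def
    have hrunlen : (run.length : Int) = l := by
      simp [hrun_def, PySem.List.length_pyRange_one]; omega
    have hfree : rep ((s, l) :: gs) = run ++ rep gs := rfl
    have hfreelen : ((run ++ rep gs).length : Int) = l + (rep gs).length := by
      simp only [List.length_append]; push_cast; omega
    by_cases hfit : need ≤ l
    · -- the first gap fits: found at position 0
      right
      refine ⟨0, s, (if l == need then gs else (s + need, l - need) :: gs), ?_, le_refl 0, ?_, hbs, ?_, ?_, ?_, ?_⟩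
      · -- has_block = 0
        show hbGo (run ++ rep gs) need
          (PySem.List.pyRange 0 (((run ++ rep gs).length : Int) - need + 1) 1) = 0
        rw [PySem.List.pyRange_one_cons (by omega)]
        show (if (PySem.List.pyGetD (run ++ rep gs) (0 + need - 1) 0
            - PySem.List.pyGetD (run ++ rep gs) 0 0 == need - 1) = true then (0:Int) else _) = 0
        rw [if_pos]
        have e1 : (0:Int) + need - 1 = need - 1 := by ring
        rw [e1, getd_run s l (rep gs) (need - 1) (by omega) (by omega),
          getd_run s l (rep gs) 0 (by omega) (by omega)]
        simp only [beq_iff_eq]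
        omega
      · -- pyGetD at 0 is s
        show PySem.List.pyGetD (run ++ rep gs) 0 0 = s
        simpa using getd_run s l (rep gs) 0 le_rfl (by omega)
      · -- findMove, no move when idx ≤ s
        intro idx hidx
        simp only [findMove, if_pos hfit, if_neg (by omega : ¬ s < idx)]
      · -- findMove, move when s < idx
        intro idx hidx
        simp only [findMove, if_pos hfit, if_pos hidx]
      · -- invariant of the shrunk list
        by_cases hle : l = need
        · rw [if_pos (by simpa using hle)]
          exact InvB_mono (by omega) hInvgs
        · rw [if_neg (by simpa using hle)]
          show b ≤ s + need ∧ 1 ≤ l - need ∧ InvB (s + need + (l - need) + 1) gs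
          refine ⟨by omega, by omega, ?_⟩
          have e2 : s + need + (l - need) + 1 = s + l + 1 := by ring
          rw [e2]
          exact hInvgs
      · -- the pop loop takes the first `need` cells of the run
        intro ks acc hks
        have hlen2 : ks.length ≤ (run ++ rep gs).length := by
          simp only [List.length_append]; omega
        rw [hfree, pop_loop_zero ks acc (run ++ rep gs) hlen2]
        have hsplit : run = PySem.List.pyRange s (s + need) 1 ++ PySem.List.pyRange (s + need) (s + l) 1 := by
          rw [hrun_def]; exact PySem.List.pyRange_one_append s (s + need) (s + l) (by omega) (by omega)
        have hlen3 : (PySem.List.pyRange s (s + need) 1).length = ks.length := by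
          rw [hks]; simp [PySem.List.length_pyRange_one]
        have htake : List.take ks.length (run ++ rep gs) = PySem.List.pyRange s (s + need) 1 := by
          rw [hsplit, List.append_assoc, List.take_append_of_le_length (by omega), ← hlen3,
            List.take_length]
        have hdrop : List.drop ks.length (run ++ rep gs)
            = rep (if l == need then gs else (s + need, l - need) :: gs) := by
          rw [hsplit, List.append_assoc, List.drop_append_of_le_length (by omega), ← hlen3,
            List.drop_length, List.nil_append]
          by_cases hle : l = need
          · rw [if_pos (by simpa using hle), PySem.List.pyRange_one_eq_nil (by omega),
              List.nil_append]
          · rw [if_neg (by simpa using hle)]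
            show _ = PySem.List.pyRange (s + need) (s + need + (l - need)) 1 ++ rep gs
            have e3 : s + need + (l - need) = s + l := by ring
            rw [e3]
        rw [htake, hdrop]
    · -- first gap too small: everything happens behind it
      have hneed2 : 2 ≤ need := by omega
      -- the scan cannot succeed inside the run
      have claim1 : ∀ i : Int, 0 ≤ i → i < l →
          ¬ (PySem.List.pyGetD (run ++ rep gs) (i + need - 1) 0
             - PySem.List.pyGetD (run ++ rep gs) i 0 == need - 1) = true := by
        intro i h0 hi
        rw [getd_run s l (rep gs) i h0 hi]
        have hj : l ≤ i + need - 1 := by omega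
        rcases Int.lt_or_le (i + need - 1) (l + ((rep gs).length : Int)) with hjL | hjL
        · have e4 : i + need - 1 = l + (i + need - 1 - l) := by ring
          rw [e4, getd_shift run (rep gs) l (i + need - 1 - l) hrunlen (by omega) 0]
          have hval := rep_lb' hInvgs (i + need - 1 - l) (by omega) (by omega)
          simp only [beq_iff_eq]
          omega
        · rw [PySem.List.pyGetD_of_nonneg _ _ (by omega), List.getD_eq_getElem?_getD,
            List.getElem?_eq_none (by simp only [List.length_append]; omega)]
          simp only [Option.getD_none, beq_iff_eq]
          omega
      rcases ih (s + l + 1) (by omega) hInvgs with ⟨hA, hF⟩ | ⟨p, s', gs1, hp_eq, hp0, hget, hbs', hF1, hF2, hInv1, hpop⟩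
      · -- nothing fits further right either
        left
        constructor
        · show hbGo (run ++ rep gs) need
            (PySem.List.pyRange 0 (((run ++ rep gs).length : Int) - need + 1) 1) = -1
          set M := ((run ++ rep gs).length : Int) - need + 1 with hM_def
          rcases Int.lt_or_le l M with hM | hM
          · rw [PySem.List.pyRange_one_append 0 l M (by omega) (by omega),
              hbGo_append _ _ _ _ (by
                intro i hi
                rw [PySem.List.mem_pyRange_one] at hi
                exact claim1 i hi.1 hi.2),
              pyRange_shift l M (by omega),
              hbGo_shift run (rep gs) need l hneed hrunlen _ (by
                intro k hk
                rw [PySem.List.mem_pyRange_one] at hk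
                exact hk.1)]
            have hA' : hbGo (rep gs) need (PySem.List.pyRange 0 (M - l) 1) = -1 := by
              have e5 : M - l = (((rep gs).length : Int)) - need + 1 := by omega
              rw [e5]; exact hA
            rw [hA', if_pos rfl]
          · apply hbGo_all_false
            intro i hi
            rw [PySem.List.mem_pyRange_one] at hi
            exact claim1 i hi.1 (by omega)
        · intro idx
          simp only [findMove, if_neg hfit, hF idx]
      · -- a gap further right fits
        have hbR : hbGo (rep gs) need
            (PySem.List.pyRange 0 ((((rep gs).length : Int)) - need + 1) 1) = p := hp_eq
        right
        refine ⟨l + p, s', (s, l) :: gs1, ?_, by omega, ?_, by omega, ?_, ?_, ?_, ?_⟩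
        · -- has_block = l + p
          show hbGo (run ++ rep gs) need
            (PySem.List.pyRange 0 (((run ++ rep gs).length : Int) - need + 1) 1) = l + p
          set M := ((run ++ rep gs).length : Int) - need + 1 with hM_def
          have hMR : 0 < (((rep gs).length : Int)) - need + 1 := by
            by_contra hc
            rw [PySem.List.pyRange_one_eq_nil (by omega)] at hbR
            simp [hbGo] at hbR
            omega
          have hM : l < M := by omega
          rw [PySem.List.pyRange_one_append 0 l M (by omega) (by omega),
            hbGo_append _ _ _ _ (by
              intro i hi
              rw [PySem.List.mem_pyRange_one] at hi
              exact claim1 i hi.1 hi.2),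
            pyRange_shift l M (by omega),
            hbGo_shift run (rep gs) need l hneed hrunlen _ (by
              intro k hk
              rw [PySem.List.mem_pyRange_one] at hk
              exact hk.1)]
          have e5 : M - l = (((rep gs).length : Int)) - need + 1 := by omega
          rw [e5, hbR, if_neg (by omega)]
        · -- value there is s'
          show PySem.List.pyGetD (run ++ rep gs) (l + p) 0 = s'
          rw [getd_shift run (rep gs) l p hrunlen hp0 0]
          exact hget
        · intro idx hidx
          simp only [findMove, if_neg hfit, hF1 idx hidx]
        · intro idx hidx
          simp only [findMove, if_neg hfit, hF2 idx hidx]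
        · exact ⟨hbs, hl1, hInv1⟩
        · intro ks acc hks
          have hsh := pop_loop_shift run p hp0 ks acc (rep gs)
          rw [hrunlen] at hsh
          rw [hfree, hsh, hpop ks acc hks]
          rfl

-- one loop iteration: A's step on the flat free list mirrors B's step on the gap list
theorem step_sim (len0 : Int) (orig fsv : List String) (gaps : List (Int × Int))
    (fid : Option String) (len : Int) (b : Int) (hb : 0 ≤ b) (hInv : InvB b gaps)
    (hlen : 0 ≤ len) (idx : Int) :
    stepA len0 (fsv, rep gaps, fid, len) (len0 - 1 - idx, PySem.List.pyGetD orig idx "")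
      = ((stepB orig (fsv, gaps, fid, len) idx).1,
         rep (stepB orig (fsv, gaps, fid, len) idx).2.1,
         (stepB orig (fsv, gaps, fid, len) idx).2.2.1,
         (stepB orig (fsv, gaps, fid, len) idx).2.2.2)
    ∧ InvB b (stepB orig (fsv, gaps, fid, len) idx).2.1
    ∧ 0 ≤ (stepB orig (fsv, gaps, fid, len) idx).2.2.2 := by
  have hidx : len0 - (len0 - 1 - idx) - 1 = idx := by ring
  simp only [stepA, stepB, hidx]
  by_cases hdot : (PySem.List.pyGetD orig idx "" == ".") = true
  · simp only [hdot, if_pos]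
    exact ⟨trivial, hInv, hlen⟩
  · rw [if_neg hdot, if_neg hdot]
    by_cases hbd : (PySem.List.pyGetD fsv (idx - 1) "" == (fid.getD (PySem.List.pyGetD orig idx ""))) = true
    · rw [if_pos hbd, if_pos hbd]
      refine ⟨rfl, hInv, ?_⟩
      show (0:Int) ≤ len + 1
      omega
    · rw [if_neg hbd, if_neg hbd]
      rcases core (len + 1) (by omega) gaps b hb hInv with ⟨hA, hF⟩ |
        ⟨p, sg, gs1, hp_eq, hp0, hget, hbsg, hF1, hF2, hInv1, hpop⟩
      · rw [hA, hF idx]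
        rw [if_neg (by simp)]
        exact ⟨rfl, hInv, le_refl 0⟩
      · rw [hp_eq, hget]
        by_cases hmove : sg < idx
        · rw [hF2 idx hmove]
          have hcond : (p > -1 && decide (sg < idx)) = true := by
            simp only [Bool.and_eq_true, decide_eq_true_eq]
            exact ⟨by simpa using (by omega : -1 < p), hmove⟩
          rw [if_pos hcond]
          have hlenks : (PySem.List.pyRange p (p + (len + 1)) 1).length = (len + 1).toNat := by
            simp [PySem.List.length_pyRange_one]
          rw [hpop (PySem.List.pyRange p (p + (len + 1)) 1) [] hlenks]
          simp only [List.nil_append]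
          exact ⟨trivial, hInv1, le_refl 0⟩
        · rw [hF1 idx (by omega)]
          have hcond : (p > -1 && decide (sg < idx)) = false := by
            simp only [Bool.and_eq_false_iff, decide_eq_false_iff_not]
            right; exact hmove
          rw [if_neg (by simp [hcond])]
          exact ⟨rfl, hInv, le_refl 0⟩

-- the whole loop, by induction from step_sim
theorem sim_fold (len0 : Int) (orig : List String) :
    ∀ (ids : List Int) (fsv : List String) (gaps : List (Int × Int)) (fid : Option String)
      (len b : Int), 0 ≤ b → InvB b gaps → 0 ≤ len →
      (ids.foldl (fun st idx => stepA len0 st (len0 - 1 - idx, PySem.List.pyGetD orig idx ""))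
          (fsv, rep gaps, fid, len)).1
        = (ids.foldl (stepB orig) (fsv, gaps, fid, len)).1 := by
  intro ids
  induction ids with
  | nil => intros; rfl
  | cons idh rest ih =>
    intro fsv gaps fid len b hb hInv hlen
    simp only [List.foldl_cons]
    obtain ⟨hEq, hInv2, hlen2⟩ := step_sim len0 orig fsv gaps fid len b hb hInv hlen idh
    rw [hEq]
    exact ih (stepB orig (fsv, gaps, fid, len) idh).1 (stepB orig (fsv, gaps, fid, len) idh).2.1
      (stepB orig (fsv, gaps, fid, len) idh).2.2.1 (stepB orig (fsv, gaps, fid, len) idh).2.2.2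
      b hb hInv2 hlen2

-- A's free-spot comprehension, as a function of the start index
def FA (xs : List String) (i : Int) : List Int :=
  (PySem.List.enumerate xs i).filterMap (fun ic => if ic.2 == "." then some ic.1 else none)

theorem FA_cons (c : String) (xs : List String) (i : Int) :
    FA (c :: xs) i = if c == "." then i :: FA xs (i + 1) else FA xs (i + 1) := by
  simp only [FA, PySem.List.enumerate_cons, List.filterMap_cons]
  by_cases hc : (c == ".") = true
  · rw [if_pos hc, if_pos hc]
  · rw [if_neg hc, if_neg hc]

theorem takeRun_spec : ∀ xs : List String, 0 ≤ (takeRun xs).1 ∧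
    xs = List.replicate (takeRun xs).1.toNat "." ++ (takeRun xs).2 ∧
    ((takeRun xs).2 = [] ∨ ∃ c t, (takeRun xs).2 = c :: t ∧ (c == ".") = false) := by
  intro xs
  induction xs with
  | nil => exact ⟨le_refl 0, rfl, Or.inl rfl⟩
  | cons c rest ih =>
    obtain ⟨ih0, ihEq, ihHead⟩ := ih
    by_cases hc : (c == ".") = true
    · have hceq : c = "." := by simpa using hc
      simp only [takeRun, if_pos hc]
      refine ⟨by omega, ?_, ihHead⟩
      have ht : (1 + (takeRun rest).1).toNat = (takeRun rest).1.toNat + 1 := by omega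
      rw [ht, List.replicate_succ, List.cons_append, hceq]
      exact congrArg (List.cons ".") ihEq
    · simp only [takeRun, if_neg hc]
      exact ⟨le_refl 0, rfl, Or.inr ⟨c, rest, rfl, by simpa using hc⟩⟩

theorem FA_replicate : ∀ (m : Nat) (ys : List String) (i : Int),
    FA (List.replicate m "." ++ ys) i = PySem.List.pyRange i (i + m) 1 ++ FA ys (i + m) := by
  intro m
  induction m with
  | zero =>
    intro ys i
    rw [List.replicate_zero, List.nil_append,
      PySem.List.pyRange_one_eq_nil (by simp), List.nil_append]
    norm_num
  | succ m ihm =>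
    intro ys i
    rw [List.replicate_succ, List.cons_append, FA_cons, if_pos (by simp), ihm ys (i + 1)]
    push_cast
    rw [PySem.List.pyRange_one_cons (by omega : i < i + ((m:Int) + 1))]
    have e1 : i + 1 + (m : Int) = i + ((m:Int) + 1) := by ring
    rw [e1, List.cons_append]

theorem buildGaps_nil (i : Int) : buildGaps [] i = [] := by
  simp [buildGaps]

theorem buildGaps_cons_dot (c : String) (rest : List String) (i : Int) (hc : (c == ".") = true) :
    buildGaps (c :: rest) i
      = (i, 1 + (takeRun rest).1) :: buildGaps (takeRun rest).2 (i + 1 + (takeRun rest).1) := by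
  rw [buildGaps, if_pos hc]

theorem buildGaps_cons_not (c : String) (rest : List String) (i : Int) (hc : (c == ".") = false) :
    buildGaps (c :: rest) i = buildGaps rest (i + 1) := by
  rw [buildGaps, if_neg (by simp [hc])]

theorem build_main : ∀ (N : Nat) (xs : List String), xs.length ≤ N → ∀ i : Int,
    rep (buildGaps xs i) = FA xs i ∧ InvB i (buildGaps xs i) ∧
    (∀ c t, xs = c :: t → (c == ".") = false → InvB (i + 1) (buildGaps xs i)) := by
  intro N
  induction N with
  | zero =>
    intro xs hxs i
    have : xs = [] := List.length_eq_zero_iff.mp (by omega)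
    subst this
    rw [buildGaps_nil]
    exact ⟨rfl, trivial, fun c t h => by simp at h⟩
  | succ N ihN =>
    intro xs hxs i
    cases xs with
    | nil =>
      rw [buildGaps_nil]
      exact ⟨rfl, trivial, fun c t h => by simp at h⟩
    | cons c rest =>
      by_cases hc : (c == ".") = true
      · obtain ⟨hr0, hrEq, hrHead⟩ := takeRun_spec rest
        have hlen : (takeRun rest).2.length ≤ N := by
          have := takeRun_len rest
          simp at hxs
          omega
        have IH2 := ihN (takeRun rest).2 hlen (i + 1 + (takeRun rest).1)
        rw [buildGaps_cons_dot c rest i hc]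
        constructor
        · -- rep = FA
          show PySem.List.pyRange i (i + (1 + (takeRun rest).1)) 1
              ++ rep (buildGaps (takeRun rest).2 (i + 1 + (takeRun rest).1)) = FA (c :: rest) i
          rw [IH2.1, FA_cons, if_pos hc]
          conv_rhs => rw [hrEq]
          rw [FA_replicate (takeRun rest).1.toNat (takeRun rest).2 (i + 1)]
          have e1 : i + 1 + ((takeRun rest).1.toNat : Int) = i + 1 + (takeRun rest).1 := by omega
          rw [e1, PySem.List.pyRange_one_cons (by omega : i < i + (1 + (takeRun rest).1))]
          have e2 : i + (1 + (takeRun rest).1) = i + 1 + (takeRun rest).1 := by ring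
          rw [e2]
          simp only [List.cons_append]
        constructor
        · -- InvB i
          refine ⟨le_refl i, by omega, ?_⟩
          rcases hrHead with h2 | ⟨c', t, h2, hc'⟩
          · rw [h2, buildGaps_nil]; trivial
          · have e3 : i + (1 + (takeRun rest).1) + 1 = (i + 1 + (takeRun rest).1) + 1 := by ring
            rw [e3]
            exact IH2.2.2 c' t h2 hc'
        · intro c' t h hcf
          rw [List.cons.injEq] at h
          rw [h.1] at hc
          rw [hc] at hcf
          exact absurd hcf (by simp)
      · have hlen : rest.length ≤ N := by simp at hxs; omega
        have IH := ihN rest hlen (i + 1)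
        have hbg : buildGaps (c :: rest) i = buildGaps rest (i + 1) :=
          buildGaps_cons_not c rest i (by simpa using hc)
        refine ⟨?_, ?_, ?_⟩
        · rw [hbg, FA_cons, if_neg hc]
          exact IH.1
        · rw [hbg]
          exact InvB_mono (by omega) IH.2.1
        · intro c' t h hcf
          rw [hbg]
          exact IH.2.1

-- bridge: A's '(i, c) over enumerate(reversed(fs[1:]))' is B's countdown over indices
theorem enum_bridge (fs : List String) :
    PySem.List.enumerate ((PySem.List.slice fs (some 1) none).reverse)
      = (PySem.List.pyRange ((fs.length : Int) - 1) 0 (-1)).map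
          (fun idx => ((fs.length : Int) - 1 - idx, PySem.List.pyGetD fs idx "")) := by
  have h1 : PySem.List.slice fs (some 1) none = fs.drop 1 := by
    rw [PySem.List.slice_from fs (by norm_num : (0:Int) ≤ (1:Int))]
    rfl
  rw [h1, PySem.List.enumerate_eq_map_pyRange _ "", PySem.List.pyRange_neg_one,
    PySem.List.pyRange_one, List.map_map, List.map_map]
  have hrevlen : (List.drop 1 fs).reverse.length = fs.length - 1 := by simp
  apply List.ext_getElem
  · simp only [List.length_map, List.length_range, PySem.List.len_eq, hrevlen]
    omega
  · intro k hk1 hk2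
    simp only [List.length_map, List.length_range, PySem.List.len_eq, hrevlen] at hk1 hk2
    simp only [List.getElem_map, List.getElem_range, Function.comp_apply]
    rw [Prod.mk.injEq]
    have hkn : k < fs.length - 1 := by omega
    constructor
    · omega
    · have e1 : (0:Int) + (k:Int) = (k:Int) := by ring
      rw [e1, PySem.List.pyGetD_natCast, List.getD_eq_getElem?_getD,
        List.getElem?_eq_getElem (by rw [hrevlen]; omega : k < (List.drop 1 fs).reverse.length)]
      rw [PySem.List.pyGetD_eq_getElem fs "" (by omega) (by omega)]
      simp only [Option.getD_some]
      rw [List.getElem_reverse, List.getElem_drop]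
      congr 1
      simp only [List.length_drop]
      omega

theorem reorganize_file_blocks_spec : Claim_equal_reorganize_file_blocks := by
  intro fs _
  show reorganize_file_blocks fs = reorganize_file_blocks_alt fs
  simp only [reorganize_file_blocks, reorganize_file_blocks_alt]
  rw [enum_bridge, List.foldl_map]
  have hbuild := build_main fs.length fs (le_refl _) 0
  have hfree : ((PySem.List.enumerate fs).filterMap
      (fun ic => if ic.2 == "." then some ic.1 else none)) = rep (buildGaps fs 0) :=
    hbuild.1.symm
  rw [hfree]
  exact sim_fold (fs.length : Int) fs (PySem.List.pyRange ((fs.length : Int) - 1) 0 (-1))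
    fs (buildGaps fs 0) none 0 0 le_rfl hbuild.2.1 le_rfl
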